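-- pv_equiv track=rewrite | github.com/flyingflying/learning-notes-2024 | 06_model_quantization/codes/02_adder.py | int32_adder
-- ===== SOURCE A (Python) =====
-- INT32_MAX = 2 ** 31 - 1
--
-- INT32_MIN = -2 ** 31
--
-- UINT32_MAX = 2 ** 32 - 1
--
-- UINT32_MIN = 0
--
-- def to_uint32(v: int):
--     assert isinstance(v, int) and INT32_MIN <= v <= INT32_MAX
--
--     if v < 0:
--         return v + UINT32_MAX + 1
--     return v
--
-- def from_uint32(v: int):
--     assert isinstance(v, int) and UINT32_MIN <= v <= UINT32_MAX
--     if v > INT32_MAX: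
--         return v - UINT32_MAX - 1
--     return v
--
-- def to_bitarray(v: int) -> tuple[int, ...]:
--     assert isinstance(v, int) and INT32_MIN <= v <= INT32_MAX
--
--     v = to_uint32(v)  # python 不支持 无符号 右移, 不需要先转换成 uint32
--     bitarray = []
--
--     for _ in range(32):
--         bitarray.insert(0, v & 0x1)
--         v = v >> 1
--
--     return tuple(bitarray)
--
-- def from_bitarray(bitarray: tuple[int, ...]) -> int:
--     v = bitarray[0]
--
--     for bit in bitarray[1:]:
--         assert isinstance(bit, int) and (bit == 0 or bit == 1)
--         v = (v << 1) | bit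
--
--     return from_uint32(v)
--
-- def full_adder(bit_a: int, bit_b: int, bit_carry_in: int) -> tuple[int, int]:
--     bit_sum = bit_a ^ bit_b ^ bit_carry_in
--     # bit_carry_out = (bit_a | bit_b) & (bit_b | bit_carry_in) & (bit_a | bit_carry_in)
--     bit_carry_out = (bit_a & bit_b) | ((bit_a ^ bit_b) & bit_carry_in)
--     return bit_carry_out, bit_sum
--
-- def int32_adder(v1: int, v2: int):
--     # https://zh.wikipedia.org/wiki/加法器
--     bitarray_v1 = to_bitarray(v1)
--     bitarray_v2 = to_bitarray(v2)
--
--     bit_carry = 0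
--     bit_array = []
--     for bit_v1, bit_v2 in zip(reversed(bitarray_v1), reversed(bitarray_v2)):
--         bit_carry, bit_sum = full_adder(bit_v1, bit_v2, bit_carry)
--         bit_array.insert(0, bit_sum)
--
--     return from_bitarray(bit_array)
-- ===== SOURCE B (Python) =====
-- INT32_MAX = 2 ** 31 - 1
-- INT32_MIN = -2 ** 31
-- UINT32_MAX = 2 ** 32 - 1
-- UINT32_MIN = 0
--
-- def to_uint32(v: int):
--     assert isinstance(v, int) and INT32_MIN <= v <= INT32_MAX
--     if v < 0:
--         return v + UINT32_MAX + 1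
--     return v
--
-- def from_uint32(v: int):
--     assert isinstance(v, int) and UINT32_MIN <= v <= UINT32_MAX
--     if v > INT32_MAX:
--         return v - UINT32_MAX - 1
--     return v
--
-- def int32_adder(v1: int, v2: int):
--     a = to_uint32(v1)
--     b = to_uint32(v2)
--     return from_uint32((a + b) & UINT32_MAX)
-- ===== Notes on version B (the rewrite author's own statement) =====
-- stated objective: simpler
-- what changed: Replaces the 32-step bit-level full-adder pipeline (to_bitarray / full_adder loop / from_bitarray) with a single masked arithmetic addition: from_uint32((to_uint32(v1) + to_uint32(v2)) & UINT32_MAX).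
import Mathlib
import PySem

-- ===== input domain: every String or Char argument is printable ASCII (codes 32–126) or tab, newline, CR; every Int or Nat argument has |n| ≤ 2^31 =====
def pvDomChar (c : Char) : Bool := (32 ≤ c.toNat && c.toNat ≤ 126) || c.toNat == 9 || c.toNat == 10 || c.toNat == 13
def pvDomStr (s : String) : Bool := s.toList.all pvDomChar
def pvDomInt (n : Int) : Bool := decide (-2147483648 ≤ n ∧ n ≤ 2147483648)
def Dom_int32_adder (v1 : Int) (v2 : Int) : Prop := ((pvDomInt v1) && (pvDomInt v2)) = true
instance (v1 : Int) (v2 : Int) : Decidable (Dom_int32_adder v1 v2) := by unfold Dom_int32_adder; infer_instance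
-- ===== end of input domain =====

-- B replaces the 32-step bit-level full-adder pipeline with a single masked addition
-- from_uint32((to_uint32(v1) + to_uint32(v2)) & UINT32_MAX)  (objective: simpler).

-- ===== PORT A =====
def pvA_to_uint32 (v : Int) : Int := if v < 0 then v + 4294967295 + 1 else v

def pvA_from_uint32 (v : Int) : Int := if v > 2147483647 then v - 4294967295 - 1 else v

-- for _ in range(32): bitarray.insert(0, v & 0x1); v = v >> 1
def pvA_to_bitarray (v : Int) : List Int :=
  ((List.range 32).foldl
      (fun (st : Int × List Int) _ => (st.1 >>> (1 : Nat), PySem.Int.band st.1 1 :: st.2))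
      (pvA_to_uint32 v, [])).2

def pvA_full_adder (bit_a bit_b bit_carry_in : Int) : Int × Int :=
  (PySem.Int.bor (PySem.Int.band bit_a bit_b)
     (PySem.Int.band (PySem.Int.bxor bit_a bit_b) bit_carry_in),
   PySem.Int.bxor (PySem.Int.bxor bit_a bit_b) bit_carry_in)

-- bitarray[0], then v = (v << 1) | bit over the tail; the [] arm is unreachable in A
-- (always called with 32 bits), and the per-bit assert never fires there (bits are 0/1).
def pvA_from_bitarray (bitarray : List Int) : Int :=
  match bitarray with
  | [] => 0
  | v0 :: rest =>
      pvA_from_uint32 (rest.foldl (fun v bit => PySem.Int.bor (v <<< (1 : Nat)) bit) v0)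

def int32_adder (v1 : Int) (v2 : Int) : Int :=
  let bitarray_v1 := pvA_to_bitarray v1
  let bitarray_v2 := pvA_to_bitarray v2
  let st := (bitarray_v1.reverse.zip bitarray_v2.reverse).foldl
      (fun (st : Int × List Int) bits =>
        let cs := pvA_full_adder bits.1 bits.2 st.1
        (cs.1, cs.2 :: st.2))
      ((0 : Int), ([] : List Int))
  pvA_from_bitarray st.2

-- ===== PORT B =====
def pvB_to_uint32 (v : Int) : Int := if v < 0 then v + 4294967295 + 1 else v

def pvB_from_uint32 (v : Int) : Int := if v > 2147483647 then v - 4294967295 - 1 else v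

def int32_adder_alt (v1 : Int) (v2 : Int) : Int :=
  let a := pvB_to_uint32 v1
  let b := pvB_to_uint32 v2
  pvB_from_uint32 (PySem.Int.band (a + b) 4294967295)

-- ===== PRECONDITION & SPEC =====
-- A's (and B's) `assert INT32_MIN <= v <= INT32_MAX` raises AssertionError outside this range
-- (Dom also admits ±2^31 itself, where A raises), so Pre_ is exactly the int32 range.
def Pre_int32_adder (v1 : Int) (v2 : Int) : Prop :=
  -2147483648 ≤ v1 ∧ v1 ≤ 2147483647 ∧ -2147483648 ≤ v2 ∧ v2 ≤ 2147483647
instance (v1 : Int) (v2 : Int) : Decidable (Pre_int32_adder v1 v2) := by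
  unfold Pre_int32_adder; infer_instance

def pvWitness_int32_adder : Int × Int := (1, -1)

def Spec_int32_adder (v1 : Int) (v2 : Int) (out : Int) : Prop := out = int32_adder_alt v1 v2
instance (v1 : Int) (v2 : Int) (out : Int) : Decidable (Spec_int32_adder v1 v2 out) := by
  unfold Spec_int32_adder; infer_instance

-- ===== CLAIM (what is proved, stated in full; the proofs are below) =====
def Claim_equal_int32_adder : Prop := ∀ (v1 : Int) (v2 : Int), Dom_int32_adder v1 v2 → Pre_int32_adder v1 v2 → Spec_int32_adder v1 v2 (int32_adder v1 v2)

-- ===== LEMMAS AND PROOFS =====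

-- LSB-first list of the n low bits of v (Euclidean = floor on these nonnegative values).
def pvBitsL : Nat → Int → List Int
  | 0, _ => []
  | n + 1, v => (v % 2) :: pvBitsL n (v / 2)

theorem pvBitsL_length (n : Nat) (v : Int) : (pvBitsL n v).length = n := by
  induction n generalizing v with
  | zero => rfl
  | succ k ih => simp [pvBitsL, ih]

theorem pvBitsL_snoc (n : Nat) (v : Int) :
    pvBitsL (n + 1) v = pvBitsL n v ++ [v / 2 ^ n % 2] := by
  induction n generalizing v with
  | zero => simp [pvBitsL]
  | succ k ih =>
      have h2 : v / 2 / 2 ^ k = v / 2 ^ (k + 1) := by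
        rw [Int.ediv_ediv_of_nonneg (by norm_num)]
        norm_num [pow_succ, mul_comm]
      calc pvBitsL (k + 2) v = (v % 2) :: pvBitsL (k + 1) (v / 2) := rfl
        _ = (v % 2) :: (pvBitsL k (v / 2) ++ [v / 2 / 2 ^ k % 2]) := by rw [ih (v / 2)]
        _ = pvBitsL (k + 1) v ++ [v / 2 ^ (k + 1) % 2] := by rw [h2]; rfl

theorem pv_shiftr (a : Int) : a >>> (1 : Nat) = a / 2 := by
  rw [Int.shiftRight_eq_div_pow]; norm_num

theorem pv_band_one (a : Int) : PySem.Int.band a 1 = a % 2 := by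
  rw [PySem.Int.band_one, PySem.Int.mod_eq_emod_of_pos (by norm_num : (0:Int) < 2)]

theorem pv_toBits_loop (n : Nat) (v : Int) (acc : List Int) :
    (List.range n).foldl
      (fun (st : Int × List Int) _ => (st.1 >>> (1 : Nat), PySem.Int.band st.1 1 :: st.2))
      (v, acc)
    = (v / 2 ^ n, (pvBitsL n v).reverse ++ acc) := by
  induction n with
  | zero => simp [pvBitsL]
  | succ k ih =>
      rw [List.range_succ, List.foldl_append, ih]
      simp only [List.foldl_cons, List.foldl_nil, Prod.mk.injEq]
      constructor
      · rw [pv_shiftr, Int.ediv_ediv_of_nonneg (by norm_num)]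
        norm_num [pow_succ]
      · rw [pv_band_one, pvBitsL_snoc]
        simp

theorem pv_to_bitarray_eq (v : Int) :
    pvA_to_bitarray v = (pvBitsL 32 (pvA_to_uint32 v)).reverse := by
  unfold pvA_to_bitarray
  rw [pv_toBits_loop]
  simp

theorem pv_full_adder_eq (a b c : Int) (ha : a = 0 ∨ a = 1) (hb : b = 0 ∨ b = 1)
    (hc : c = 0 ∨ c = 1) :
    pvA_full_adder a b c = ((a + b + c) / 2, (a + b + c) % 2) := by
  rcases ha with rfl | rfl <;> rcases hb with rfl | rfl <;> rcases hc with rfl | rfl <;> decide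

theorem pv_addloop (n : Nat) (a b c : Int) (acc : List Int)
    (ha : 0 ≤ a) (hb : 0 ≤ b) (hc : c = 0 ∨ c = 1) :
    (((pvBitsL n a).zip (pvBitsL n b)).foldl
       (fun (st : Int × List Int) bits =>
         let cs := pvA_full_adder bits.1 bits.2 st.1
         (cs.1, cs.2 :: st.2))
       (c, acc)).2
    = (pvBitsL n (a + b + c)).reverse ++ acc := by
  induction n generalizing a b c acc with
  | zero => simp [pvBitsL]
  | succ k ih =>
      simp only [pvBitsL, List.zip_cons_cons, List.foldl_cons]
      rw [pv_full_adder_eq (a % 2) (b % 2) c (by omega) (by omega) hc]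
      simp only []
      rw [ih (a / 2) (b / 2) _ _ (by omega) (by omega) (by omega)]
      have h1 : a / 2 + b / 2 + (a % 2 + b % 2 + c) / 2 = (a + b + c) / 2 := by omega
      have h2 : (a % 2 + b % 2 + c) % 2 = (a + b + c) % 2 := by omega
      rw [h1, h2]
      simp

theorem pv_mod_split (K x : Int) (hK : 0 < K) :
    x % (2 * K) = 2 * (x / 2 % K) + x % 2 := by
  have hA0 : 0 ≤ x / 2 % K := Int.emod_nonneg _ (by omega)
  have hAK : x / 2 % K < K := Int.emod_lt_of_pos _ hK
  have e1 : 2 * (x / 2) + x % 2 = x := by omega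
  have e2 : x / 2 % K + K * (x / 2 / K) = x / 2 := Int.emod_add_mul_ediv (x / 2) K
  have hx : x = (2 * (x / 2 % K) + x % 2) + (2 * K) * (x / 2 / K) := by
    linear_combination -e1 - 2 * e2
  conv_lhs => rw [hx]
  rw [Int.add_mul_emod_self_left]
  exact Int.emod_eq_of_lt (by omega) (by omega)

theorem pv_bor_double (w r : Int) (hw : 0 ≤ w) (hr : r = 0 ∨ r = 1) :
    PySem.Int.bor (w <<< (1 : Nat)) r = 2 * w + r := by
  have hsl : w <<< (1 : Nat) = 2 * w := by rw [Int.shiftLeft_eq]; ring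
  rcases hr with rfl | rfl
  · rw [PySem.Int.bor_zero, hsl]; ring
  · rw [hsl, PySem.Int.bor_of_nonneg (by omega) (by norm_num)]
    have ht : (2 * w).toNat = 2 * w.toNat := by omega
    have h1 : (1 : Int).toNat = 1 := rfl
    rw [ht, h1]
    have hlor : (2 * w.toNat) ||| 1 = 2 * w.toNat + 1 := by
      have h := Nat.lor_bit false w.toNat true 0
      simpa [Nat.bit, Nat.two_mul, Nat.mul_comm] using h
    rw [hlor]; omega

theorem pv_horner (n : Nat) (x v : Int) (hv : 0 ≤ v) :
    ((pvBitsL n x).reverse).foldl (fun v bit => PySem.Int.bor (v <<< (1 : Nat)) bit) v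
    = v * 2 ^ n + x % 2 ^ n := by
  induction n generalizing x v with
  | zero => simp [pvBitsL]
  | succ k ih =>
      simp only [pvBitsL, List.reverse_cons, List.foldl_append, List.foldl_cons,
        List.foldl_nil]
      rw [ih (x / 2) v hv]
      have hmod : 0 ≤ x / 2 % 2 ^ k := Int.emod_nonneg _ (by positivity)
      rw [pv_bor_double _ _ (by positivity) (by omega)]
      have hs : x % 2 ^ (k + 1) = 2 * (x / 2 % 2 ^ k) + x % 2 := by
        have h := pv_mod_split (2 ^ k) x (by positivity)
        rw [← h]; norm_num [pow_succ, mul_comm]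
      rw [hs]; ring

theorem pv_from_bitarray_nonempty (l : List Int) (hl : l ≠ []) :
    pvA_from_bitarray l
    = pvA_from_uint32 (l.foldl (fun v bit => PySem.Int.bor (v <<< (1 : Nat)) bit) 0) := by
  cases l with
  | nil => exact absurd rfl hl
  | cons h t =>
      show pvA_from_uint32 _ = pvA_from_uint32 _
      congr 1
      rw [List.foldl_cons]
      congr 1
      have h0 : (0 : Int) <<< (1 : Nat) = 0 := by rw [Int.shiftLeft_eq]; ring
      rw [h0, PySem.Int.bor_comm, PySem.Int.bor_zero]

theorem pv_to_uint32_bounds (v : Int) (h : -2147483648 ≤ v ∧ v ≤ 2147483647) :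
    0 ≤ pvA_to_uint32 v ∧ pvA_to_uint32 v < 4294967296 := by
  unfold pvA_to_uint32; split_ifs <;> omega

theorem pv_A_closed (v1 v2 : Int) (h1 : -2147483648 ≤ v1 ∧ v1 ≤ 2147483647)
    (h2 : -2147483648 ≤ v2 ∧ v2 ≤ 2147483647) :
    int32_adder v1 v2
    = pvA_from_uint32 ((pvA_to_uint32 v1 + pvA_to_uint32 v2) % 4294967296) := by
  obtain ⟨hu1, hu1'⟩ := pv_to_uint32_bounds v1 h1
  obtain ⟨hu2, hu2'⟩ := pv_to_uint32_bounds v2 h2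
  unfold int32_adder
  simp only [pv_to_bitarray_eq, List.reverse_reverse]
  rw [pv_addloop 32 (pvA_to_uint32 v1) (pvA_to_uint32 v2) 0 [] hu1 hu2 (Or.inl rfl)]
  have hne : (pvBitsL 32 (pvA_to_uint32 v1 + pvA_to_uint32 v2 + 0)).reverse
      ++ ([] : List Int) ≠ [] := by
    have hlen := pvBitsL_length 32 (pvA_to_uint32 v1 + pvA_to_uint32 v2 + 0)
    intro hcon
    simp only [List.append_nil, List.reverse_eq_nil_iff] at hcon
    rw [hcon] at hlen
    simp at hlen
  rw [pv_from_bitarray_nonempty _ hne]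
  simp only [List.append_nil]
  rw [pv_horner 32 (pvA_to_uint32 v1 + pvA_to_uint32 v2 + 0) 0 le_rfl]
  norm_num

theorem pv_B_closed (v1 v2 : Int) (h1 : -2147483648 ≤ v1 ∧ v1 ≤ 2147483647)
    (h2 : -2147483648 ≤ v2 ∧ v2 ≤ 2147483647) :
    int32_adder_alt v1 v2
    = pvA_from_uint32 ((pvA_to_uint32 v1 + pvA_to_uint32 v2) % 4294967296) := by
  obtain ⟨hu1, hu1'⟩ := pv_to_uint32_bounds v1 h1
  obtain ⟨hu2, hu2'⟩ := pv_to_uint32_bounds v2 h2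
  unfold int32_adder_alt
  have e1 : pvB_to_uint32 v1 = pvA_to_uint32 v1 := rfl
  have e2 : pvB_to_uint32 v2 = pvA_to_uint32 v2 := rfl
  have e3 : ∀ w : Int, pvB_from_uint32 w = pvA_from_uint32 w := fun _ => rfl
  simp only [e1, e2, e3]
  congr 1
  rw [PySem.Int.band_of_nonneg (by omega) (by norm_num)]
  have hmask : (4294967295 : Int).toNat = 2 ^ 32 - 1 := rfl
  rw [hmask, Nat.and_two_pow_sub_one_eq_mod]
  omega

-- ===== VERDICT (by name: the statement is the Claim_ definition above) =====
theorem int32_adder_spec : Claim_equal_int32_adder := by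
  unfold Claim_equal_int32_adder
  intro v1 v2 _ hpre
  unfold Spec_int32_adder
  obtain ⟨h1l, h1r, h2l, h2r⟩ := hpre
  rw [pv_A_closed v1 v2 ⟨h1l, h1r⟩ ⟨h2l, h2r⟩, pv_B_closed v1 v2 ⟨h1l, h1r⟩ ⟨h2l, h2r⟩]
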